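-- pv_equiv track=rewrite | github.com/pypi-data/pypi-mirror-42 | packages/raziel/raziel-0.0.4.post1.tar.gz/raziel-0.0.4.post1/raziel/Raziel.py | toScheme
-- ===== SOURCE A (Python) =====
-- def toScheme (tagset, scheme="iobes", outside="O"):
--     scheme = scheme.lower()
--     if scheme == "iobes" or scheme == "bioes":
--         return ([outside]+["I-"+x for x in tagset]+["B-"+x for x in tagset]+["E-"+x for x in tagset]+["S-"+x for x in tagset])
--     elif (scheme == "bilou"):
--         return (
--         [outside] + ["B-" + x for x in tagset] + ["I-" + x for x in tagset] + ["L-" + x for x in tagset] + ["U-" + x for x in tagset])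
--     elif (scheme == "bio" or scheme == "iob"):
--         return ([outside] + ["B-" + x for x in tagset] + ["I-" + x for x in tagset])
--     elif(scheme == "noprefix"):
--         return [outside] + tagset
--
--     return(tagset)
-- ===== SOURCE B (Python) =====
-- _SCHEMES = {"iobes": "IBES", "bioes": "IBES", "bilou": "BILU", "bio": "BI", "iob": "BI"}
--
-- def toScheme(tagset, scheme="iobes", outside="O"):
--     scheme = scheme.lower()
--     prefixes = _SCHEMES.get(scheme)
--     if prefixes is None:
--         if scheme == "noprefix":
--             return [outside] + tagset
--         return tagset
--     # transposed traversal: ONE pass over tagset, each tag is dropped into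
--     # k parallel buckets at once; the buckets are concatenated at the end.
--     buckets = [[] for _ in prefixes]
--     for x in tagset:
--         for i, p in enumerate(prefixes):
--             buckets[i].append(p + "-" + x)
--     out = [outside]
--     for b in buckets:
--         out += b
--     return out
-- ===== Notes on version B (the rewrite author's own statement) =====
-- stated objective: alternative
-- what changed: Transposes the iteration: instead of A's k staged full passes over tagset (one hardcoded comprehension per prefix letter, chosen by an if-elif chain), B makes a single pass over tagset, appending each tag simultaneously to k parallel per-prefix buckets (prefix letters taken from a scheme table), and concatenates the buckets at the end; correct because the concatenated buckets reproduce the per-prefix blocks in the same order.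
import Mathlib
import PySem

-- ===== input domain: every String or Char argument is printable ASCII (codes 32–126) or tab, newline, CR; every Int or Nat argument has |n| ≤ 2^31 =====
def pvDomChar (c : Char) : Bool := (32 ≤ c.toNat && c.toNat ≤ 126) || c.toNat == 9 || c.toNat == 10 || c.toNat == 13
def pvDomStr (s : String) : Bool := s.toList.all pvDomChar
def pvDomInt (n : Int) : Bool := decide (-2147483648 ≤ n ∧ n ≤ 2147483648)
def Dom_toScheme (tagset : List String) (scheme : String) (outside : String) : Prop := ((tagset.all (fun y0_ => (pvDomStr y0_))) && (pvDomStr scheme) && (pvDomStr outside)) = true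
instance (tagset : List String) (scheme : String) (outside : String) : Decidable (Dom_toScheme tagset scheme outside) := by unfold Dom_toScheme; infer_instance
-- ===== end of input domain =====

-- ===== PORT A =====
def toScheme (tagset : List String) (scheme : String) (outside : String) : List String :=
  let scheme := PySem.Str.lower scheme
  if scheme = "iobes" ∨ scheme = "bioes" then
    [outside] ++ tagset.map (fun x => "I-" ++ x) ++ tagset.map (fun x => "B-" ++ x)
      ++ tagset.map (fun x => "E-" ++ x) ++ tagset.map (fun x => "S-" ++ x)
  else if scheme = "bilou" then
    [outside] ++ tagset.map (fun x => "B-" ++ x) ++ tagset.map (fun x => "I-" ++ x)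
      ++ tagset.map (fun x => "L-" ++ x) ++ tagset.map (fun x => "U-" ++ x)
  else if scheme = "bio" ∨ scheme = "iob" then
    [outside] ++ tagset.map (fun x => "B-" ++ x) ++ tagset.map (fun x => "I-" ++ x)
  else if scheme = "noprefix" then
    [outside] ++ tagset
  else
    tagset

-- ===== PORT B =====
-- B: one transposed pass over tagset filling k parallel per-prefix buckets, then concatenate
-- (instead of A's k staged full passes chosen by an if-elif chain).
def pvSchemes : PySem.Dict String String :=
  PySem.Dict.ofList [("iobes", "IBES"), ("bioes", "IBES"), ("bilou", "BILU"), ("bio", "BI"), ("iob", "BI")]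

def toScheme_alt (tagset : List String) (scheme : String) (outside : String) : List String :=
  let scheme := PySem.Str.lower scheme
  match PySem.Dict.get? pvSchemes scheme with
  | none => if scheme = "noprefix" then [outside] ++ tagset else tagset
  | some prefixes =>
    -- buckets[i].append(p + "-" + x) for each (i, p) = enumerate(prefixes), per tag x
    let buckets := tagset.foldl
      (fun bks x => List.zipWith (fun b p => b ++ [p.toString ++ "-" ++ x]) bks prefixes.toList)
      (prefixes.toList.map (fun _ => ([] : List String)))
    buckets.foldl (fun out b => out ++ b) [outside]

-- ===== PRECONDITION & SPEC =====
def Spec_toScheme (tagset : List String) (scheme : String) (outside : String) (out : List String) : Prop := out = toScheme_alt tagset scheme outside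
instance (tagset : List String) (scheme : String) (outside : String) (out : List String) : Decidable (Spec_toScheme tagset scheme outside out) := by unfold Spec_toScheme; infer_instance

-- ===== CLAIM (what is proved, stated in full; the proofs are below) =====
def Claim_equal_toScheme : Prop := ∀ (tagset : List String) (scheme : String) (outside : String), Dom_toScheme tagset scheme outside → Spec_toScheme tagset scheme outside (toScheme tagset scheme outside)

-- ===== LEMMAS AND PROOFS =====

lemma gIobes : PySem.Dict.get? pvSchemes "iobes" = some "IBES" := by decide
lemma gBioes : PySem.Dict.get? pvSchemes "bioes" = some "IBES" := by decide
lemma gBilou : PySem.Dict.get? pvSchemes "bilou" = some "BILU" := by decide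
lemma gBio : PySem.Dict.get? pvSchemes "bio" = some "BI" := by decide
lemma gIob : PySem.Dict.get? pvSchemes "iob" = some "BI" := by decide

lemma tbl_none (k : String) (h1 : "iobes" ≠ k) (h2 : "bioes" ≠ k) (h3 : "bilou" ≠ k)
    (h4 : "bio" ≠ k) (h5 : "iob" ≠ k) : PySem.Dict.get? pvSchemes k = none := by
  have e1 := beq_eq_false_iff_ne.mpr h1
  have e2 := beq_eq_false_iff_ne.mpr h2
  have e3 := beq_eq_false_iff_ne.mpr h3
  have e4 := beq_eq_false_iff_ne.mpr h4
  have e5 := beq_eq_false_iff_ne.mpr h5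
  have tbl_eq : pvSchemes = PySem.Dict.mk
      [("iobes", "IBES"), ("bioes", "IBES"), ("bilou", "BILU"), ("bio", "BI"), ("iob", "BI")] := by
    decide
  rw [tbl_eq]
  simp [PySem.Dict.get?_mk_cons, PySem.Dict.get?, e1, e2, e3, e4, e5]

-- appending one element to each mapped bucket stays a map
lemma zip_step (ps : List Char) (g : Char → List String) (x : String) :
    List.zipWith (fun b p => b ++ [p.toString ++ "-" ++ x]) (ps.map g) ps
      = ps.map (fun p => g p ++ [p.toString ++ "-" ++ x]) := by
  induction ps with
  | nil => rfl
  | cons c cs ih => simpa using ih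

-- loop invariant of B's single pass: each bucket accumulates its prefix's tags in order
lemma fold_inv (ts : List String) (ps : List Char) (g : Char → List String) :
    ts.foldl
      (fun bks x => List.zipWith (fun b p => b ++ [p.toString ++ "-" ++ x]) bks ps)
      (ps.map g)
      = ps.map (fun p => g p ++ ts.map (fun x => p.toString ++ "-" ++ x)) := by
  induction ts generalizing g with
  | nil => simp
  | cons x ts ih =>
    rw [List.foldl_cons, zip_step, ih (fun p => g p ++ [p.toString ++ "-" ++ x])]
    simp [List.append_assoc]

-- concatenating the buckets
lemma foldl_append (l : List (List String)) (init : List String) :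
    l.foldl (fun out b => out ++ b) init = init ++ l.flatten := by
  induction l generalizing init with
  | nil => simp
  | cons b bs ih => simp [List.foldl_cons, ih, List.append_assoc]

-- B's whole prefix branch, for a concrete prefix string
lemma alt_branch (ts : List String) (ps : String) (outside : String) :
    (let buckets := ts.foldl
        (fun bks x => List.zipWith (fun b p => b ++ [p.toString ++ "-" ++ x]) bks ps.toList)
        (ps.toList.map (fun _ => ([] : List String)))
     buckets.foldl (fun out b => out ++ b) [outside])
      = [outside] ++ (ps.toList.map (fun p => ts.map (fun x => p.toString ++ "-" ++ x))).flatten := by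
  have h := fold_inv ts ps.toList (fun _ => ([] : List String))
  simp only [h, foldl_append]
  simp

lemma dashI (x : String) : String.singleton 'I' ++ "-" ++ x = "I-" ++ x := rfl
lemma dashB (x : String) : String.singleton 'B' ++ "-" ++ x = "B-" ++ x := rfl
lemma dashE (x : String) : String.singleton 'E' ++ "-" ++ x = "E-" ++ x := rfl
lemma dashS (x : String) : String.singleton 'S' ++ "-" ++ x = "S-" ++ x := rfl
lemma dashL (x : String) : String.singleton 'L' ++ "-" ++ x = "L-" ++ x := rfl
lemma dashU (x : String) : String.singleton 'U' ++ "-" ++ x = "U-" ++ x := rfl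

-- ===== VERDICT (by name: the statement is the Claim_ definition above) =====
theorem toScheme_spec : Claim_equal_toScheme := by
  intro tagset scheme outside _
  unfold Spec_toScheme toScheme toScheme_alt
  by_cases h1 : PySem.Str.lower scheme = "iobes"
  · simp only [h1, gIobes]
    rw [alt_branch]
    simp [List.append_assoc, dashI, dashB, dashE, dashS]
  by_cases h2 : PySem.Str.lower scheme = "bioes"
  · simp only [h2, gBioes]
    rw [alt_branch]
    simp [List.append_assoc, dashI, dashB, dashE, dashS]
  by_cases h3 : PySem.Str.lower scheme = "bilou"
  · simp only [h3, gBilou]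
    rw [alt_branch]
    simp [List.append_assoc, dashB, dashI, dashL, dashU]
  by_cases h4 : PySem.Str.lower scheme = "bio"
  · simp only [h4, gBio]
    rw [alt_branch]
    simp [dashB, dashI]
  by_cases h5 : PySem.Str.lower scheme = "iob"
  · simp only [h5, gIob]
    rw [alt_branch]
    simp [dashB, dashI]
  have hn := tbl_none (PySem.Str.lower scheme) (Ne.symm h1) (Ne.symm h2) (Ne.symm h3)
    (Ne.symm h4) (Ne.symm h5)
  by_cases h6 : PySem.Str.lower scheme = "noprefix"
  · simp only [h6] at hn ⊢
    simp [hn]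
  · simp [hn, h1, h2, h3, h4, h5, h6]
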